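-- pv_equiv track=rewrite | github.com/JoaoFelipe/patterncounter | src/patterncounter/sequences.py | convert_sequences
-- ===== SOURCE A (Python) =====
-- from typing import List
-- from typing import Sequence
--
-- TSequence = List[List[str]]
--
-- def convert_sequences(
--     sequences: list[TSequence], conversions: dict[str, str], remove: Sequence[str]
-- ) -> tuple[list[TSequence], list[str]]:
--     """Converts and filters sequences."""
--     failures = []
--     new_sequences: list[TSequence] = []
--     for sequence in sequences:
--         new_sequence: TSequence = []
--         new_sequences.append(new_sequence)
--         for group in sequence:
--             new_group: list[str] = []
--             new_sequence.append(new_group)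
--             for element in group:
--                 if element not in conversions:
--                     failures.append(element)
--                     continue
--                 new_element = conversions[element]
--                 for prefix in remove:
--                     if new_element.startswith(prefix):
--                         break
--                 else:
--                     new_group.append(new_element)
--
--     return new_sequences, failures
-- ===== SOURCE B (Python) =====
-- def convert_sequences(sequences, conversions, remove):
--     """Converts and filters sequences."""
--     # Stage 1: the set of elements that actually occur.
--     elements = {
--         element
--         for sequence in sequences
--         for group in sequence
--         for element in group
--     }
--     # Stage 2: pre-filter the conversion table once - only occurring keys whose
--     # target survives prefix removal; per-element work is then dict lookups only.
--     kept = {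
--         key: value
--         for key, value in conversions.items()
--         if key in elements and not any(value.startswith(prefix) for prefix in remove)
--     }
--     new_sequences = [
--         [[kept[element] for element in group if element in kept] for group in sequence]
--         for sequence in sequences
--     ]
--     failures = [
--         element
--         for sequence in sequences
--         for group in sequence
--         for element in group
--         if element not in conversions
--     ]
--     return new_sequences, failures
-- ===== Notes on version B (the rewrite author's own statement) =====
-- stated objective: alternative
-- what changed: A runs one interleaved mutating pass doing a per-occurrence prefix scan over remove; B first collects the set of occurring elements, pre-filters the conversion table once into a 'kept' dict (one prefix scan per occurring key, not per occurrence), then builds the output with pure lookups and collects failures in a separate flat pass.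
import Mathlib
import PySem

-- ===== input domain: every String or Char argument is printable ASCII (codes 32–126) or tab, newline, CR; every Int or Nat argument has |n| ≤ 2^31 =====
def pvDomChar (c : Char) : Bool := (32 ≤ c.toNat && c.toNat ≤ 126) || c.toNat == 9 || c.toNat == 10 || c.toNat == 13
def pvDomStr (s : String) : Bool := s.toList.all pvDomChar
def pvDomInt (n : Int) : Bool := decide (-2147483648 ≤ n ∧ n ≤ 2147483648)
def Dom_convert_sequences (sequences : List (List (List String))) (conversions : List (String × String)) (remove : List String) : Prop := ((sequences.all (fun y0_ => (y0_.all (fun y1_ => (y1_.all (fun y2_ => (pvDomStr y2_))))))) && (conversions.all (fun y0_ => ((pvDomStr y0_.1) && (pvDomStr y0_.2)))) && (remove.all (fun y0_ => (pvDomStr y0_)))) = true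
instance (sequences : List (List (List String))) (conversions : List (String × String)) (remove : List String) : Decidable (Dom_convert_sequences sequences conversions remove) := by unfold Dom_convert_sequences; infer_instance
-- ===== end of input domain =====

-- B hoists the per-element prefix scan into a one-time pre-filtering of the conversion table; same results, stated as an alternative decomposition.

-- ===== PORT A =====
-- Port of A: one interleaved fold threading (new_sequences, failures) through all three nested loops.
def convert_sequences (sequences : List (List (List String))) (conversions : List (String × String)) (remove : List String) : List (List (List String)) × List String :=
  sequences.foldl
    (fun st sequence =>
      let inner :=
        sequence.foldl
          (fun st2 group =>
            let g :=
              group.foldl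
                (fun st3 element =>
                  match PySem.Dict.get? (PySem.Dict.mk conversions) element with
                  | none => (st3.1, st3.2 ++ [element])
                  | some new_element =>
                    if remove.any (fun prefixx => PySem.Str.startswith new_element prefixx) then st3
                    else (st3.1 ++ [new_element], st3.2))
                (([] : List String), st2.2)
            (st2.1 ++ [g.1], g.2))
          (([] : List (List String)), st.2)
      (st.1 ++ [inner.1], inner.2))
    (([] : List (List (List String))), ([] : List String))

-- ===== PORT B =====
-- Port of B: collect the set of occurring elements, pre-filter the conversion
-- table into `kept` once, then a pure nested map over `kept` lookups, and
-- failures in a separate flat pass over `conversions`.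
def convert_sequences_alt (sequences : List (List (List String))) (conversions : List (String × String)) (remove : List String) : List (List (List String)) × List String :=
  let elements : PySem.Set String :=
    PySem.Set.ofList (sequences.flatMap (fun sequence =>
      sequence.flatMap (fun group => group)))
  let kept :=
    PySem.Dict.mk (conversions.filter
      (fun kv => PySem.Set.contains elements kv.1 &&
        !(remove.any (fun prefixx => PySem.Str.startswith kv.2 prefixx))))
  let new_sequences :=
    sequences.map (fun sequence =>
      sequence.map (fun group =>
        group.filterMap (fun element => PySem.Dict.get? kept element)))
  let failures :=
    sequences.flatMap (fun sequence =>
      sequence.flatMap (fun group =>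
        group.filter (fun element => (PySem.Dict.get? (PySem.Dict.mk conversions) element).isNone)))
  (new_sequences, failures)

-- ===== PRECONDITION & SPEC =====
-- Pre_ excludes association lists with duplicate keys, which a Python dict can never
-- contain: there first-match (A) vs pre-filtered-table-match (B) order is accidental.
def Pre_convert_sequences (sequences : List (List (List String))) (conversions : List (String × String)) (remove : List String) : Prop :=
  (conversions.map Prod.fst).Nodup
instance (sequences : List (List (List String))) (conversions : List (String × String)) (remove : List String) : Decidable (Pre_convert_sequences sequences conversions remove) := by unfold Pre_convert_sequences; infer_instance

def pvWitness_convert_sequences : List (List (List String)) × (List (String × String)) × List String :=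
  ([[["a", "b"], ["c"]], [["a"]]], [("a", "xA"), ("c", "rC")], ["r"])

def Spec_convert_sequences (sequences : List (List (List String))) (conversions : List (String × String)) (remove : List String) (out : List (List (List String)) × List String) : Prop := out = convert_sequences_alt sequences conversions remove
instance (sequences : List (List (List String))) (conversions : List (String × String)) (remove : List String) (out : List (List (List String)) × List String) : Decidable (Spec_convert_sequences sequences conversions remove out) := by unfold Spec_convert_sequences; infer_instance

-- ===== CLAIM (what is proved, stated in full; the proofs are below) =====
def Claim_equal_convert_sequences : Prop := ∀ (sequences : List (List (List String))) (conversions : List (String × String)) (remove : List String), Dom_convert_sequences sequences conversions remove → Pre_convert_sequences sequences conversions remove → Spec_convert_sequences sequences conversions remove (convert_sequences sequences conversions remove)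

-- ===== LEMMAS AND PROOFS =====

-- step function of A's innermost loop, named for the lemmas
def stepA (conversions : List (String × String)) (remove : List String)
    (st3 : List String × List String) (element : String) : List String × List String :=
  match PySem.Dict.get? (PySem.Dict.mk conversions) element with
  | none => (st3.1, st3.2 ++ [element])
  | some new_element =>
    if remove.any (fun prefixx => PySem.Str.startswith new_element prefixx) then st3
    else (st3.1 ++ [new_element], st3.2)

def keepF (conversions : List (String × String)) (remove : List String) (element : String) : Option String :=
  match PySem.Dict.get? (PySem.Dict.mk conversions) element with
  | none => none
  | some ne =>
    if remove.any (fun prefixx => PySem.Str.startswith ne prefixx) then none else some ne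

def failP (conversions : List (String × String)) (element : String) : Bool :=
  (PySem.Dict.get? (PySem.Dict.mk conversions) element).isNone

theorem stepA_none (conversions : List (String × String)) (remove : List String)
    (st : List String × List String) (e : String)
    (h : PySem.Dict.get? (PySem.Dict.mk conversions) e = none) :
    stepA conversions remove st e = (st.1, st.2 ++ [e]) := by
  unfold stepA; rw [h]

theorem stepA_some (conversions : List (String × String)) (remove : List String)
    (st : List String × List String) (e ne : String)
    (h : PySem.Dict.get? (PySem.Dict.mk conversions) e = some ne) :
    stepA conversions remove st e =
      if remove.any (fun prefixx => PySem.Str.startswith ne prefixx) then st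
      else (st.1 ++ [ne], st.2) := by
  unfold stepA; rw [h]

theorem group_loop (conversions : List (String × String)) (remove : List String)
    (group : List String) (accN accF : List String) :
    group.foldl (stepA conversions remove) (accN, accF) =
      (accN ++ group.filterMap (keepF conversions remove),
       accF ++ group.filter (failP conversions)) := by
  induction group generalizing accN accF with
  | nil => simp
  | cons e rest ih =>
    rw [List.foldl_cons, List.filterMap_cons, List.filter_cons]
    cases h : PySem.Dict.get? (PySem.Dict.mk conversions) e with
    | none =>
      rw [stepA_none conversions remove _ e h, ih]
      simp only [keepF, failP, h]
      simp
    | some ne =>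
      rw [stepA_some conversions remove _ e ne h]
      cases hb : remove.any (fun prefixx => PySem.Str.startswith ne prefixx) with
      | true =>
        simp only [if_true, ih]
        simp only [keepF, failP, h, hb]
        simp
      | false =>
        simp only [if_false, Bool.false_eq_true, ih]
        simp only [keepF, failP, h, hb]
        simp

theorem seq_loop (conversions : List (String × String)) (remove : List String)
    (sequence : List (List String)) (accS : List (List String)) (accF : List String) :
    sequence.foldl
        (fun st2 group =>
          let g := group.foldl (stepA conversions remove) (([] : List String), st2.2)
          (st2.1 ++ [g.1], g.2))
        (accS, accF) =
      (accS ++ sequence.map (fun g => g.filterMap (keepF conversions remove)),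
       accF ++ sequence.flatMap (fun g => g.filter (failP conversions))) := by
  induction sequence generalizing accS accF with
  | nil => simp
  | cons g rest ih =>
    simp only [List.foldl_cons, List.map_cons, List.flatMap_cons]
    rw [group_loop]
    simp [ih]

theorem top_loop (conversions : List (String × String)) (remove : List String)
    (sequences : List (List (List String))) (accT : List (List (List String))) (accF : List String) :
    sequences.foldl
        (fun st sequence =>
          let inner :=
            sequence.foldl
              (fun st2 group =>
                let g := group.foldl (stepA conversions remove) (([] : List String), st2.2)
                (st2.1 ++ [g.1], g.2))
              (([] : List (List String)), st.2)
          (st.1 ++ [inner.1], inner.2))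
        (accT, accF) =
      (accT ++ sequences.map (fun seq => seq.map (fun g => g.filterMap (keepF conversions remove))),
       accF ++ sequences.flatMap (fun seq => seq.flatMap (fun g => g.filter (failP conversions)))) := by
  induction sequences generalizing accT accF with
  | nil => simp
  | cons sq rest ih =>
    simp only [List.foldl_cons, List.map_cons, List.flatMap_cons]
    rw [seq_loop]
    simp [ih]

-- Under unique keys, lookup in the pre-filtered table is lookup-then-test in the full table.
theorem find_filter_of_nodup {ν : Type} (p : String × ν → Bool)
    (l : List (String × ν)) (hn : (l.map Prod.fst).Nodup) (e : String) :
    ((l.filter p).find? (fun kv => kv.1 == e)) =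
      match l.find? (fun kv => kv.1 == e) with
      | none => none
      | some kv => if p kv then some kv else none := by
  induction l with
  | nil => simp
  | cons kv rest ih =>
    simp only [List.map_cons, List.nodup_cons] at hn
    rw [List.filter_cons]
    by_cases he : kv.1 = e
    · have hfind : List.find? (fun kv => kv.1 == e) (kv :: rest) = some kv := by
        simp [he]
      rw [hfind]
      have hrest : rest.find? (fun kv' => kv'.1 == e) = none := by
        rw [List.find?_eq_none]
        intro x hx hbeq
        exact hn.1 (by
          have : x.1 = e := by simpa using hbeq
          rw [← he] at this
          exact this ▸ (List.mem_map.mpr ⟨x, hx, rfl⟩))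
      have hrestf : (rest.filter p).find? (fun kv' => kv'.1 == e) = none := by
        rw [List.find?_eq_none]
        intro x hx hbeq
        have := List.find?_eq_none.mp hrest x (List.mem_of_mem_filter hx)
        exact this hbeq
      by_cases hp : p kv = true
      · simp [hp, he]
      · simp only [hp, Bool.false_eq_true, if_false]
        simp [hrestf]
    · have hfind : List.find? (fun kv' => kv'.1 == e) (kv :: rest) =
          rest.find? (fun kv' => kv'.1 == e) := by
        simp [he]
      rw [hfind, ← ih hn.2]
      by_cases hp : p kv = true
      · simp [hp, he]
      · simp [hp]

theorem kept_get_eq_keepF (conversions : List (String × String)) (remove : List String)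
    (elements : PySem.Set String)
    (hn : (conversions.map Prod.fst).Nodup) (e : String) (he : e ∈ elements) :
    PySem.Dict.get?
      (PySem.Dict.mk (conversions.filter
        (fun kv => PySem.Set.contains elements kv.1 &&
          !(remove.any (fun prefixx => PySem.Str.startswith kv.2 prefixx))))) e
      = keepF conversions remove e := by
  unfold keepF
  simp only [PySem.Dict.get?]
  rw [find_filter_of_nodup _ conversions hn e]
  cases h : conversions.find? (fun kv => kv.1 == e) with
  | none => simp
  | some kv =>
    have hk : kv.1 = e := by simpa using List.find?_some h
    have hc : PySem.Set.contains elements kv.1 = true := by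
      rw [hk]; exact (PySem.Set.contains_iff _ _).mpr he
    cases hb : remove.any (fun prefixx => PySem.Str.startswith kv.2 prefixx) with
    | true =>
      dsimp only; rw [hc, hb]; simp
      obtain ⟨x, hx, hs⟩ := List.any_eq_true.mp hb
      exact ⟨x, hx, by simpa using hs⟩
    | false =>
      dsimp only; rw [hc, hb]; simp
      intro x hx
      have := List.any_eq_false.mp (by simpa using hb) x hx
      simpa using this

-- ===== VERDICT (by name: the statement is the Claim_ definition above) =====
theorem convert_sequences_spec : Claim_equal_convert_sequences := by
  intro sequences conversions remove _ hpre
  unfold Spec_convert_sequences convert_sequences convert_sequences_alt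
  have h := top_loop conversions remove sequences [] []
  unfold stepA at h
  rw [h]
  dsimp only
  simp only [List.nil_append, Prod.mk.injEq]
  refine ⟨?_, rfl⟩
  apply List.map_congr_left; intro seq hseq
  apply List.map_congr_left; intro g hg
  refine List.filterMap_congr (fun e he' => ?_)
  exact (kept_get_eq_keepF conversions remove _ hpre e
    ((PySem.Set.mem_ofList _ _).mpr (List.mem_flatMap.mpr
      ⟨seq, hseq, List.mem_flatMap.mpr ⟨g, hg, he'⟩⟩))).symm
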